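-- pv_equiv track=rewrite | github.com/rajiv143/NL-OpenScenario | utility/analyze_road_topology.py | find_adjacent_lane_pairs
-- ===== SOURCE A (Python) =====
-- from typing import Dict, List, Any, Tuple, Optional
--
-- def find_adjacent_lane_pairs(lane_ids: List[int]) -> List[Tuple[int, int]]:
--     """Find pairs of lanes that are adjacent (consecutive IDs)"""
--     pairs = []
--     sorted_lanes = sorted(lane_ids)
--
--     for i in range(len(sorted_lanes) - 1):
--         curr_lane = sorted_lanes[i]
--         next_lane = sorted_lanes[i + 1]
--
--         # Adjacent if consecutive and same direction
--         if abs(next_lane - curr_lane) == 1: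
--             # Same direction check
--             if (curr_lane > 0 and next_lane > 0) or (curr_lane < 0 and next_lane < 0):
--                 pairs.append((curr_lane, next_lane))
--
--     return pairs
-- ===== SOURCE B (Python) =====
-- def find_adjacent_lane_pairs(lane_ids):
--     """Find pairs of lanes that are adjacent (consecutive IDs)"""
--     s = set(lane_ids)
--     starts = s & {y - 1 for y in s}          # x in starts iff x and x+1 both occur
--     return [(x, x + 1) for x in sorted(starts) if x > 0 or x + 1 < 0]
-- ===== Notes on version B (the rewrite author's own statement) =====
-- stated objective: alternative
-- what changed: A sorts the whole list and scans adjacent positions of the sorted array for consecutive same-sign values; B never scans for adjacency at all: it computes the pair starts by set algebra as the intersection of the id set with its shift-by-one ({y-1 for y in S}), then sorts only those starts and filters out the sign-crossing pair.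
import Mathlib
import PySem

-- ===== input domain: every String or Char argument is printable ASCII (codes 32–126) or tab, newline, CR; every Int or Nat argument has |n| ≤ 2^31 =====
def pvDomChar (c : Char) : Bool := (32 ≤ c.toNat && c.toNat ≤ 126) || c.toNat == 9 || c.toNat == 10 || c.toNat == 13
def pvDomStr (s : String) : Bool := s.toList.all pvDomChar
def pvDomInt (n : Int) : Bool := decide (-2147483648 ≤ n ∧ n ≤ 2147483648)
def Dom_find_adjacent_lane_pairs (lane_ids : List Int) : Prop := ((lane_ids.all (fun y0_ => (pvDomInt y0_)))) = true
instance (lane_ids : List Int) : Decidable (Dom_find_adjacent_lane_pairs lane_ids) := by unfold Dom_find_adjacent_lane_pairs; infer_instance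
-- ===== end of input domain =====

-- B replaces A's adjacency scan over the sorted list by set algebra: the pair starts are the
-- intersection of the id set with its shift-by-one; only those starts are sorted — alternative,
-- same return value on every input.

-- ===== PORT A =====
def find_adjacent_lane_pairs (lane_ids : List Int) : List (Int × Int) :=
  let sorted_lanes := PySem.List.sorted lane_ids (fun x => x) false
  (PySem.List.pyRange 0 ((sorted_lanes.length : Int) - 1) 1).foldl
    (fun pairs i =>
      let curr_lane := PySem.List.pyGetD sorted_lanes i 0
      let next_lane := PySem.List.pyGetD sorted_lanes (i + 1) 0
      if |next_lane - curr_lane| = 1 then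
        if (curr_lane > 0 ∧ next_lane > 0) ∨ (curr_lane < 0 ∧ next_lane < 0) then
          pairs ++ [(curr_lane, next_lane)]
        else pairs
      else pairs) []

-- ===== PORT B =====
def find_adjacent_lane_pairs_alt (lane_ids : List Int) : List (Int × Int) :=
  let s := PySem.Set.ofList lane_ids
  let starts := PySem.Set.inter s (PySem.Set.ofList (s.map (fun y => y - 1)))
  ((PySem.List.sorted starts (fun x => x) false).filter
      (fun x => decide (x > 0) || decide (x + 1 < 0))).map (fun x => (x, x + 1))

-- ===== PRECONDITION & SPEC =====
def Spec_find_adjacent_lane_pairs (lane_ids : List Int) (out : List (Int × Int)) : Prop := out = find_adjacent_lane_pairs_alt lane_ids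
instance (lane_ids : List Int) (out : List (Int × Int)) : Decidable (Spec_find_adjacent_lane_pairs lane_ids out) := by unfold Spec_find_adjacent_lane_pairs; infer_instance

-- ===== CLAIM (what is proved, stated in full; the proofs are below) =====
def Claim_equal_find_adjacent_lane_pairs : Prop := ∀ (lane_ids : List Int), Dom_find_adjacent_lane_pairs lane_ids → Spec_find_adjacent_lane_pairs lane_ids (find_adjacent_lane_pairs lane_ids)

-- ===== LEMMAS AND PROOFS =====

-- A's pair condition on a candidate (a, b)
def apCond (a b : Int) : Bool :=
  decide (|b - a| = 1) && decide ((a > 0 ∧ b > 0) ∨ (a < 0 ∧ b < 0))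

-- the adjacent-pair scan, as a filter over consecutive positions
def zipf (l : List Int) : List (Int × Int) :=
  (l.zip l.tail).filter (fun p => apCond p.1 p.2)

-- duplicate removal for a (≤-sorted) list, keeping one copy of each run
def sdedup : List Int → List Int
  | [] => []
  | [a] => [a]
  | a :: b :: t => if a = b then sdedup (b :: t) else a :: sdedup (b :: t)

theorem zipf_single (a : Int) : zipf [a] = [] := rfl
theorem zipf_cons_cons (a b : Int) (t : List Int) :
    zipf (a :: b :: t) = (if apCond a b then [(a, b)] else []) ++ zipf (b :: t) := by
  simp only [zipf, List.zip, List.tail, List.zipWith, List.filter]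
  cases h : apCond a b <;> simp

theorem mem_sdedup (x : Int) : ∀ l : List Int, x ∈ sdedup l ↔ x ∈ l
  | [] => by simp [sdedup]
  | [a] => by simp [sdedup]
  | a :: b :: t => by
    rw [sdedup]
    by_cases h : a = b
    · simp [h, mem_sdedup x (b :: t)]
    · simp [h, mem_sdedup x (b :: t)]

theorem exists_sdedup_cons : ∀ (t : List Int) (b : Int), ∃ r, sdedup (b :: t) = b :: r
  | [], b => ⟨[], rfl⟩
  | a :: t', b => by
    by_cases h : b = a
    · obtain ⟨r, hr⟩ := exists_sdedup_cons t' a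
      exact ⟨r, by rw [sdedup, if_pos h, hr, h]⟩
    · exact ⟨sdedup (a :: t'), by rw [sdedup, if_neg h]⟩

theorem pairwise_lt_sdedup : ∀ l : List Int, l.Pairwise (· ≤ ·) → (sdedup l).Pairwise (· < ·)
  | [] , _ => by simp [sdedup]
  | [a], _ => by simp [sdedup]
  | a :: b :: t, h => by
    rw [sdedup]
    have ht := (List.pairwise_cons.1 h).2
    by_cases hab : a = b
    · simpa [hab] using pairwise_lt_sdedup (b :: t) ht
    · rw [if_neg hab]
      refine List.pairwise_cons.2 ⟨?_, pairwise_lt_sdedup (b :: t) ht⟩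
      intro x hx
      have hxm : x ∈ b :: t := (mem_sdedup x (b :: t)).1 hx
      have hax : a ≤ b := (List.pairwise_cons.1 h).1 b (by simp)
      rcases List.mem_cons.1 hxm with rfl | hxt
      · exact lt_of_le_of_ne hax hab
      · exact lt_of_lt_of_le (lt_of_le_of_ne hax hab) ((List.pairwise_cons.1 ht).1 x hxt)

-- dropping duplicates does not change the adjacent-pair scan of a ≤-sorted list
theorem zipf_sdedup : ∀ l : List Int, l.Pairwise (· ≤ ·) → zipf l = zipf (sdedup l)
  | [] , _ => rfl
  | [a], _ => rfl
  | a :: b :: t, h => by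
    have ht := (List.pairwise_cons.1 h).2
    rw [sdedup]
    by_cases hab : a = b
    · rw [if_pos hab, zipf_cons_cons, ← zipf_sdedup (b :: t) ht]
      have : apCond a b = false := by
        subst hab; simp [apCond]
      simp [this]
    · rw [if_neg hab]
      obtain ⟨r, hr⟩ := exists_sdedup_cons t b
      rw [hr, zipf_cons_cons, zipf_cons_cons, ← hr, ← zipf_sdedup (b :: t) ht]

-- on a strictly increasing list, the adjacent-pair scan is the successor-membership filter
theorem zipf_strict : ∀ d : List Int, d.Pairwise (· < ·) →
    zipf d = (d.filter (fun x => decide (x + 1 ∈ d) && (decide (x > 0) || decide (x + 1 < 0)))).map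
      (fun x => (x, x + 1))
  | [], _ => rfl
  | [a], _ => by simp [zipf_single]
  | a :: b :: t, h => by
    have hab : a < b := (List.pairwise_cons.1 h).1 b (by simp)
    have ht := (List.pairwise_cons.1 h).2
    have hmem : ∀ x ∈ b :: t,
        (decide (x + 1 ∈ a :: b :: t) && (decide (x > 0) || decide (x + 1 < 0)))
        = (decide (x + 1 ∈ b :: t) && (decide (x > 0) || decide (x + 1 < 0))) := by
      intro x hx
      have hbx : b ≤ x := by
        rcases List.mem_cons.1 hx with rfl | hxt
        · exact le_refl x
        · exact le_of_lt ((List.pairwise_cons.1 ht).1 x hxt)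
      have hiff : (x + 1 ∈ a :: b :: t) ↔ (x + 1 ∈ b :: t) := by
        constructor
        · intro hm
          rcases List.mem_cons.1 hm with he | hm'
          · omega
          · exact hm'
        · intro hm; exact List.mem_cons.2 (Or.inr hm)
      simp [hiff]
    have hsucc : (a + 1 ∈ a :: b :: t) ↔ b = a + 1 := by
      constructor
      · intro hm
        rcases List.mem_cons.1 hm with he | hm'
        · omega
        · rcases List.mem_cons.1 hm' with he | hmt
          · omega
          · have := (List.pairwise_cons.1 ht).1 _ hmt
            omega
      · intro he; exact List.mem_cons.2 (Or.inr (by simp [he]))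
    have habs : |b - a| = b - a := abs_of_nonneg (by omega)
    rw [zipf_cons_cons, List.filter_cons, List.filter_congr hmem, zipf_strict (b :: t) ht]
    by_cases he : b = a + 1
    · by_cases hs : a > 0 ∨ a + 1 < 0
      · have h1 : apCond a b = true := by
          simp only [apCond, Bool.and_eq_true, decide_eq_true_eq]
          omega
        have h2 : (decide (a + 1 ∈ a :: b :: t) && (decide (a > 0) || decide (a + 1 < 0))) = true := by
          simp only [Bool.and_eq_true, Bool.or_eq_true, decide_eq_true_eq, hsucc]
          omega
        rw [if_pos h1, if_pos h2]
        simp [he]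
      · have h1 : apCond a b = false := by
          simp only [apCond, Bool.and_eq_false_iff, decide_eq_false_iff_not]
          right; omega
        have h2 : (decide (a + 1 ∈ a :: b :: t) && (decide (a > 0) || decide (a + 1 < 0))) = false := by
          simp only [Bool.and_eq_false_iff, Bool.or_eq_false_iff, decide_eq_false_iff_not]
          right; omega
        rw [if_neg (ne_true_of_eq_false h1), if_neg (ne_true_of_eq_false h2)]
        simp
    · have h1 : apCond a b = false := by
        simp only [apCond, Bool.and_eq_false_iff, decide_eq_false_iff_not]
        left; omega
      have h2 : (decide (a + 1 ∈ a :: b :: t) && (decide (a > 0) || decide (a + 1 < 0))) = false := by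
        simp only [Bool.and_eq_false_iff, decide_eq_false_iff_not]
        left; simp [hsucc, he]
      rw [if_neg (ne_true_of_eq_false h1), if_neg (ne_true_of_eq_false h2)]
      simp

-- sorted(set(xs)) is exactly the duplicate-free version of sorted(xs)
theorem sorted_ofList_eq_sdedup (xs : List Int) :
    PySem.List.sorted (PySem.Set.ofList xs) (fun x => x) false
      = sdedup (PySem.List.sorted xs (fun x => x) false) := by
  have hs : (PySem.List.sorted xs (fun x => x) false).Pairwise (· ≤ ·) := by
    simpa using PySem.List.sorted_pairwise xs (fun x => x)
  have hlt := pairwise_lt_sdedup _ hs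
  refine PySem.List.sorted_eq_of_perm_of_pairwise_lt _ _ _ ?_ hlt
  have hnd : (sdedup (PySem.List.sorted xs (fun x => x) false)).Nodup :=
    List.Pairwise.imp (fun h => ne_of_lt h) hlt
  refine (List.perm_ext_iff_of_nodup hnd (PySem.Set.nodup_ofList xs)).2 ?_
  · intro a
    rw [mem_sdedup, PySem.Set.mem_ofList]
    exact ((PySem.List.sorted_perm xs (fun x => x) false).mem_iff)

-- A computes the adjacent-pair scan of the sorted list
theorem portA_eq_zipf (xs : List Int) :
    find_adjacent_lane_pairs xs = zipf (PySem.List.sorted xs (fun x => x) false) := by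
  unfold find_adjacent_lane_pairs
  set s := PySem.List.sorted xs (fun x => x) false with hsdef
  simp only []
  rw [PySem.List.foldl_congr_mem'
      (f := fun pairs i =>
        let curr_lane := PySem.List.pyGetD s i 0
        let next_lane := PySem.List.pyGetD s (i + 1) 0
        if |next_lane - curr_lane| = 1 then
          if (curr_lane > 0 ∧ next_lane > 0) ∨ (curr_lane < 0 ∧ next_lane < 0) then
            pairs ++ [(curr_lane, next_lane)]
          else pairs
        else pairs)
      (g := fun pairs i =>
        if apCond (PySem.List.pyGetD s i 0) (PySem.List.pyGetD s (i + 1) 0) then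
          pairs ++ [(PySem.List.pyGetD s i 0, PySem.List.pyGetD s (i + 1) 0)]
        else pairs)
      _ _ (by
        intro i _ acc
        simp only [apCond]
        by_cases h1 : |PySem.List.pyGetD s (i+1) 0 - PySem.List.pyGetD s i 0| = 1 <;>
          by_cases h2 : (PySem.List.pyGetD s i 0 > 0 ∧ PySem.List.pyGetD s (i+1) 0 > 0) ∨
            (PySem.List.pyGetD s i 0 < 0 ∧ PySem.List.pyGetD s (i+1) 0 < 0) <;>
          simp [h1, h2])]
  rw [PySem.List.foldl_append_if
      (p := fun i => apCond (PySem.List.pyGetD s i 0) (PySem.List.pyGetD s (i + 1) 0))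
      (f := fun i => (PySem.List.pyGetD s i 0, PySem.List.pyGetD s (i + 1) 0))]
  have hmap : (PySem.List.pyRange 0 ((s.length : Int) - 1) 1).map
      (fun i => (PySem.List.pyGetD s i 0, PySem.List.pyGetD s (i + 1) 0)) = s.zip s.tail := by
    apply List.ext_getElem
    · simp [PySem.List.length_pyRange_one, List.length_zip, List.length_tail]
    · intro k h1 h2
      have hk : k < s.length - 1 := by
        have := h1
        simp [PySem.List.length_pyRange_one] at this
        omega
      have hr : (PySem.List.pyRange 0 ((s.length : Int) - 1) 1)[k]'(by simpa using h1) = (k : Int) := by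
        rw [PySem.List.getElem_pyRange_one]; ring
      simp only [List.getElem_map, hr]
      rw [PySem.List.pyGetD_eq_getElem s 0 (by positivity) (by omega),
          PySem.List.pyGetD_eq_getElem s 0 (by positivity) (by omega)]
      have e1 : ((k : Int)).toNat = k := by omega
      have e2 : (((k : Int)) + 1).toNat = k + 1 := by omega
      simp [List.getElem_zip, List.getElem_tail, e1, e2]
  rw [List.nil_append]
  have hpf : (fun i => apCond (PySem.List.pyGetD s i 0) (PySem.List.pyGetD s (i + 1) 0))
      = ((fun p : Int × Int => apCond p.1 p.2) ∘
          (fun i => (PySem.List.pyGetD s i 0, PySem.List.pyGetD s (i + 1) 0))) := rfl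
  rw [hpf, ← List.filter_map, hmap]
  rfl

-- sorting the shift-intersection = filtering sorted(set(xs)) by successor membership
theorem sorted_inter_eq_filter (xs : List Int) :
    PySem.List.sorted
        (PySem.Set.inter (PySem.Set.ofList xs)
          (PySem.Set.ofList ((PySem.Set.ofList xs).map (fun y => y - 1)))) (fun x => x) false
      = (PySem.List.sorted (PySem.Set.ofList xs) (fun x => x) false).filter
          (fun x => decide (x + 1 ∈ PySem.List.sorted (PySem.Set.ofList xs) (fun x => x) false)) := by
  set S := PySem.Set.ofList xs with hS
  have hSlt : (PySem.List.sorted S (fun x => x) false).Pairwise (· < ·) := by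
    rw [hS, sorted_ofList_eq_sdedup]
    exact pairwise_lt_sdedup _ (by simpa using PySem.List.sorted_pairwise xs (fun x => x))
  have hflt : ((PySem.List.sorted S (fun x => x) false).filter
      (fun x => decide (x + 1 ∈ PySem.List.sorted S (fun x => x) false))).Pairwise (· < ·) :=
    List.Pairwise.filter _ hSlt
  refine PySem.List.sorted_eq_of_perm_of_pairwise_lt _ _ _ ?_ hflt
  have hndS : S.Nodup := PySem.Set.nodup_ofList xs
  have hndI : (PySem.Set.inter S (PySem.Set.ofList (S.map (fun y => y - 1)))).Nodup :=
    PySem.Set.nodup_inter _ _ hndS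
  have hndF : ((PySem.List.sorted S (fun x => x) false).filter
      (fun x => decide (x + 1 ∈ PySem.List.sorted S (fun x => x) false))).Nodup :=
    List.Pairwise.imp (fun h => ne_of_lt h) hflt
  refine (List.perm_ext_iff_of_nodup hndF hndI).2 ?_
  intro a
  have hms : ∀ z : Int, z ∈ PySem.List.sorted S (fun x => x) false ↔ z ∈ S := fun z =>
    (PySem.List.sorted_perm S (fun x => x) false).mem_iff
  simp only [List.mem_filter, hms, PySem.Set.mem_inter, PySem.Set.mem_ofList, List.mem_map,
    decide_eq_true_eq]
  constructor
  · rintro ⟨ha, hsucc⟩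
    exact ⟨ha, a + 1, hsucc, by ring⟩
  · rintro ⟨ha, y, hy, hya⟩
    have hya' : y = a + 1 := by omega
    exact ⟨ha, hya' ▸ hy⟩

-- B is the successor-membership-and-sign filter over sorted(set(xs))
theorem portB_eq (xs : List Int) :
    find_adjacent_lane_pairs_alt xs
      = ((PySem.List.sorted (PySem.Set.ofList xs) (fun x => x) false).filter
          (fun x => decide (x + 1 ∈ PySem.List.sorted (PySem.Set.ofList xs) (fun x => x) false)
            && (decide (x > 0) || decide (x + 1 < 0)))).map (fun x => (x, x + 1)) := by
  unfold find_adjacent_lane_pairs_alt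
  simp only []
  rw [sorted_inter_eq_filter, List.filter_filter]
  congr 1
  apply List.filter_congr
  intro x _
  cases h1 : decide (x + 1 ∈ PySem.List.sorted (PySem.Set.ofList xs) (fun x => x) false) <;>
    cases h2 : (decide (x > 0) || decide (x + 1 < 0)) <;> simp

-- ===== VERDICT (by name: the statement is the Claim_ definition above) =====
theorem find_adjacent_lane_pairs_spec : Claim_equal_find_adjacent_lane_pairs := by
  intro xs _
  unfold Spec_find_adjacent_lane_pairs
  have hle : (PySem.List.sorted xs (fun x => x) false).Pairwise (· ≤ ·) := by
    simpa using PySem.List.sorted_pairwise xs (fun x => x)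
  have hlt : (PySem.List.sorted (PySem.Set.ofList xs) (fun x => x) false).Pairwise (· < ·) := by
    rw [sorted_ofList_eq_sdedup]
    exact pairwise_lt_sdedup _ hle
  rw [portA_eq_zipf, portB_eq, ← zipf_strict _ hlt, sorted_ofList_eq_sdedup, ← zipf_sdedup _ hle]
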